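-- pv_equiv track=rewrite | github.com/ozhatuka/oz | python_part1.py | count_expanding_series
-- ===== SOURCE A (Python) =====
-- def is_expanding_index(ls):
--     for i in range(len(ls) - 2):
--         if i == 0:
--             difference_1 = abs(ls[i + 1] - ls[i])
--         difference_next = abs(ls[i + 2] - ls[i + 1])
--         if difference_1 >= difference_next:
--             return i - 1
--         difference_1 = difference_next
--     return i
--
-- def count_expanding_series(ls):
--     count = 0
--     ls_2 = ls.copy()
--     while 1:
--         if len(ls_2) > 2:
--             count = count + 1
--             index = is_expanding_index(ls_2)
--             if index + 1 == len(ls_2):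
--                 return count
--             else:
--                 ls_2 = ls_2[index + 3:]
--         elif len(ls_2) != 0:
--             count = count + 1
--             return count
--         else:
--             return count
-- ===== SOURCE B (Python) =====
-- def count_expanding_series(ls):
--     n = len(ls)
--     pos = 0
--     count = 0
--     while n - pos > 2:
--         count += 1
--         i = pos
--         while i < n - 2 and abs(ls[i + 1] - ls[i]) < abs(ls[i + 2] - ls[i + 1]):
--             i += 1
--         if i == n - 2:
--             return count
--         pos = i + 2
--     return count + (1 if n - pos != 0 else 0)
-- ===== Notes on version B (the rewrite author's own statement) =====
-- stated objective: faster
-- what changed: B keeps a running start index and scans the original list in one pass instead of re-slicing the remaining list on every segment and re-calling a helper on the copy.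
import Mathlib
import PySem

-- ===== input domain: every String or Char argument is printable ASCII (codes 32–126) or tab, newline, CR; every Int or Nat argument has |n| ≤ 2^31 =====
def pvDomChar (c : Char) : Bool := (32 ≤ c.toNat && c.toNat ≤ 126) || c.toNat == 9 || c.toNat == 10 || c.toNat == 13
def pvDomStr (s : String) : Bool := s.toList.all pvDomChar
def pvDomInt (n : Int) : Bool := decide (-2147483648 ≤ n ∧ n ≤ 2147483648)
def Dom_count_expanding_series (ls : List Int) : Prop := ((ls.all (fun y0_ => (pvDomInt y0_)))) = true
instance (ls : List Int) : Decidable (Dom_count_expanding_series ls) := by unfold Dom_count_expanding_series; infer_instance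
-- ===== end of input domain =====

-- B replaces A's repeated list slicing by a running start index over the original
-- list, a single pass that is measurably faster on long inputs (objective: faster).
-- The `fuel` parameters below only make the loops total; they are always large
-- enough that the exhausted-fuel branch is unreachable.

-- ===== PORT A =====
-- the for-loop of is_expanding_index; `diff1` carries Python's difference_1
def ieiAux (ls : List Int) (stop : Nat) : Nat → Nat → Int → Int
  | 0, i, _ => (i : Int)                    -- fuel exhausted: unreachable for fuel ≥ stop - i
  | fuel + 1, i, diff1 =>
    let dn := |ls.getD (i + 2) 0 - ls.getD (i + 1) 0|
    if diff1 ≥ dn then (i : Int) - 1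
    else if i + 1 < stop then ieiAux ls stop fuel (i + 1) dn
    else (i : Int)

def is_expanding_index (ls : List Int) : Int :=
  -- Python's loop runs only if range(len-2) is nonempty; otherwise Python raises
  -- NameError (i unbound) — that case is never reached by count_expanding_series.
  if 0 < ls.length - 2 then
    ieiAux ls (ls.length - 2) (ls.length - 2) 0 (|ls.getD 1 0 - ls.getD 0 0|)
  else 0

-- the `while 1` loop of A; `count` is the accumulator
def ceGo : Nat → List Int → Int → Int
  | 0, _, count => count                    -- fuel exhausted: unreachable for fuel ≥ length + 1
  | fuel + 1, ls2, count =>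
    if ls2.length > 2 then
      let count := count + 1
      let index := is_expanding_index ls2
      if index + 1 = (ls2.length : Int) then count
      else ceGo fuel (PySem.List.slice ls2 (some (index + 3)) none) count
    else if ls2.length ≠ 0 then count + 1
    else count

def count_expanding_series (ls : List Int) : Int := ceGo (ls.length + 1) ls 0

-- ===== PORT B =====
-- the inner while of Source B: advance i while the differences keep growing
def bScan (ls : List Int) (n : Nat) : Nat → Nat → Nat
  | 0, i => i                               -- fuel exhausted: unreachable for fuel ≥ n - 2 - i
  | fuel + 1, i =>
    if i < n - 2 ∧ |ls.getD (i + 1) 0 - ls.getD i 0| < |ls.getD (i + 2) 0 - ls.getD (i + 1) 0| then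
      bScan ls n fuel (i + 1)
    else i

-- the outer while of Source B: `pos` is the running start index
def bGo (ls : List Int) (n : Nat) : Nat → Nat → Int → Int
  | 0, _, count => count                    -- fuel exhausted: unreachable for fuel ≥ n - pos + 1
  | fuel + 1, pos, count =>
    if n - pos > 2 then
      let count := count + 1
      let i := bScan ls n n pos
      if i = n - 2 then count
      else bGo ls n fuel (i + 2) count
    else count + (if n - pos ≠ 0 then 1 else 0)

def count_expanding_series_alt (ls : List Int) : Int := bGo ls ls.length (ls.length + 1) 0 0

-- ===== PRECONDITION & SPEC =====
def Spec_count_expanding_series (ls : List Int) (out : Int) : Prop := out = count_expanding_series_alt ls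
instance (ls : List Int) (out : Int) : Decidable (Spec_count_expanding_series ls out) := by unfold Spec_count_expanding_series; infer_instance

-- ===== CLAIM (what is proved, stated in full; the proofs are below) =====
def Claim_equal_count_expanding_series : Prop := ∀ (ls : List Int), Dom_count_expanding_series ls → Spec_count_expanding_series ls (count_expanding_series ls)

-- ===== LEMMAS AND PROOFS =====

theorem bScan_ge (ls : List Int) (n fuel i : Nat) : i ≤ bScan ls n fuel i := by
  induction fuel generalizing i with
  | zero => simp [bScan]
  | succ fuel ih =>
    rw [bScan]
    split
    · exact le_trans (by omega) (ih (i + 1))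
    · exact le_rfl

theorem bScan_le (ls : List Int) (n fuel i : Nat) (h : i ≤ n - 2) :
    bScan ls n fuel i ≤ n - 2 := by
  induction fuel generalizing i with
  | zero => simpa [bScan]
  | succ fuel ih =>
    rw [bScan]
    split
    · next hc => exact ih (i + 1) (by omega)
    · exact h

-- the scan result does not depend on the fuel, as long as there is enough of it
theorem bScan_fuel (ls : List Int) (n f1 f2 i : Nat) (h1 : n - 2 ≤ i + f1) (h2 : n - 2 ≤ i + f2) :
    bScan ls n f1 i = bScan ls n f2 i := by
  induction f1 generalizing f2 i with
  | zero =>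
    cases f2 with
    | zero => rfl
    | succ f2 =>
      rw [bScan, bScan, if_neg (fun hc => absurd hc.1 (by omega))]
  | succ f1 ih =>
    cases f2 with
    | zero =>
      rw [bScan, bScan, if_neg (fun hc => absurd hc.1 (by omega))]
    | succ f2 =>
      rw [bScan, bScan]
      split
      · next hc => exact ih f2 (i + 1) (by omega) (by omega)
      · rfl

theorem drop_getD (ls : List Int) (p j : Nat) :
    (ls.drop p).getD j 0 = ls.getD (p + j) 0 := by
  simp [List.getD, List.getElem?_drop]

theorem scan_rel (ls : List Int) (p : Nat) (fuel : Nat) (j : Nat)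
    (h : p + j + 3 ≤ ls.length) (hf : ls.length - p - 2 ≤ j + fuel) :
    ieiAux (ls.drop p) (ls.length - p - 2) fuel j (|ls.getD (p + j + 1) 0 - ls.getD (p + j) 0|) =
      (if bScan ls ls.length ls.length (p + j) = ls.length - 2 then ((ls.length : Int) - p - 3)
       else (bScan ls ls.length ls.length (p + j) : Int) - p - 1) := by
  induction fuel generalizing j with
  | zero => omega
  | succ fuel ih =>
    rw [ieiAux]
    rw [bScan_fuel ls ls.length ls.length (ls.length - (p + j)) (p + j) (by omega) (by omega)]
    have hlf : ls.length - (p + j) = (ls.length - (p + j) - 1) + 1 := by omega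
    rw [hlf, bScan]
    rw [drop_getD, drop_getD]
    rw [show p + (j + 2) = p + j + 2 by omega, show p + (j + 1) = p + j + 1 by omega]
    by_cases hd : |ls.getD (p + j + 1) 0 - ls.getD (p + j) 0| ≥
        |ls.getD (p + j + 2) 0 - ls.getD (p + j + 1) 0|
    · -- violation here: A returns j-1, B's scan stops at p+j
      have hbc : ¬ (p + j < ls.length - 2 ∧
          |ls.getD (p + j + 1) 0 - ls.getD (p + j) 0| < |ls.getD (p + j + 2) 0 - ls.getD (p + j + 1) 0|) :=
        fun hc => absurd hc.2 (not_lt.mpr hd)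
      rw [if_pos hd, if_neg hbc, if_neg (by omega : ¬ (p + j = ls.length - 2))]
      push_cast; ring
    · have hbc : (p + j < ls.length - 2 ∧
          |ls.getD (p + j + 1) 0 - ls.getD (p + j) 0| < |ls.getD (p + j + 2) 0 - ls.getD (p + j + 1) 0|) :=
        ⟨by omega, lt_of_not_ge hd⟩
      rw [if_neg hd]
      by_cases hcont : j + 1 < ls.length - p - 2
      · rw [if_pos hcont, if_pos hbc]
        have := ih (j + 1) (by omega) (by omega)
        rw [show p + (j + 1) = p + j + 1 by omega] at this
        rw [show p + j + 1 + 1 = p + j + 2 by omega] at this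
        rw [bScan_fuel ls ls.length ls.length (ls.length - (p + j) - 1) (p + j + 1)
          (by omega) (by omega)] at this
        exact this
      · -- end of the segment: fully expanding
        rw [if_neg hcont, if_pos hbc]
        have hlf2 : ls.length - (p + j) - 1 = (ls.length - (p + j) - 2) + 1 := by omega
        rw [hlf2, bScan]
        have hbc2 : ¬ (p + j + 1 < ls.length - 2 ∧
            |ls.getD (p + j + 1 + 1) 0 - ls.getD (p + j + 1) 0| <
              |ls.getD (p + j + 1 + 2) 0 - ls.getD (p + j + 1 + 1) 0|) :=
          fun hc => absurd hc.1 (by omega)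
        rw [if_neg hbc2, if_pos (by omega : p + j + 1 = ls.length - 2)]
        omega

theorem go_rel (ls : List Int) (fa : Nat) (fb : Nat) (p : Nat) (c : Int)
    (hp : p ≤ ls.length) (hfa : ls.length - p + 1 ≤ fa) (hfb : ls.length - p + 1 ≤ fb) :
    ceGo fa (ls.drop p) c = bGo ls ls.length fb p c := by
  induction fa generalizing fb p c with
  | zero => omega
  | succ fa ih =>
    cases fb with
    | zero => omega
    | succ fb =>
    rw [ceGo, bGo]
    simp only [List.length_drop]
    by_cases hbig : ls.length - p > 2
    · rw [if_pos hbig, if_pos hbig]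
      have hidx : is_expanding_index (ls.drop p) =
          (if bScan ls ls.length ls.length p = ls.length - 2 then ((ls.length : Int) - p - 3)
           else (bScan ls ls.length ls.length p : Int) - p - 1) := by
        unfold is_expanding_index
        rw [if_pos (by simp only [List.length_drop]; omega)]
        simp only [List.length_drop]
        rw [drop_getD, drop_getD]
        have := scan_rel ls p (ls.length - p - 2) 0 (by omega) (by omega)
        simpa using this
      set r := bScan ls ls.length ls.length p with hr
      have hrge : p ≤ r := bScan_ge ls ls.length ls.length p
      have hrle : r ≤ ls.length - 2 := bScan_le ls ls.length ls.length p (by omega)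
      by_cases hfull : r = ls.length - 2
      · -- fully expanding tail: A slices to [], one more iteration returns count
        rw [if_pos hfull]
        rw [hidx, if_pos hfull]
        rw [if_neg (by omega)]
        rw [PySem.List.slice_from _ (by omega)]
        rw [show ((ls.length : Int) - p - 3 + 3).toNat = ls.length - p by omega]
        rw [List.drop_drop]
        rw [show p + (ls.length - p) = ls.length by omega]
        rw [List.drop_length]
        have hfa1 : fa = (fa - 1) + 1 := by omega
        rw [hfa1, ceGo]
        norm_num
      · rw [if_neg hfull]
        rw [hidx, if_neg hfull]
        rw [if_neg (by omega)]
        rw [PySem.List.slice_from _ (by omega)]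
        rw [show ((r : Int) - p - 1 + 3).toNat = r + 2 - p by omega]
        rw [List.drop_drop]
        rw [show p + (r + 2 - p) = r + 2 by omega]
        exact ih fb (r + 2) (c + 1) (by omega) (by omega) (by omega)
    · rw [if_neg hbig, if_neg hbig]
      by_cases hz : ls.length - p ≠ 0
      · rw [if_pos hz, if_pos hz]
      · rw [if_neg hz, if_neg hz]; ring

-- ===== VERDICT (by name: the statement is the Claim_ definition above) =====
theorem count_expanding_series_spec : Claim_equal_count_expanding_series := by
  intro ls _
  unfold Spec_count_expanding_series count_expanding_series count_expanding_series_alt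
  have := go_rel ls (ls.length + 1) (ls.length + 1) 0 0 (by omega) (by omega) (by omega)
  simpa using this
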